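-- pv_equiv track=rewrite | github.com/esdandreu/KickStart | 2021/H/transform-the-string.py | solution
-- ===== SOURCE A (Python) =====
-- def solution(S: str, F: str) -> int:
--     sol = 0
--     base = ord('a') - 1
--     limit = ord('z') - base
--     for char in S:
--         v = ord(char) - base
--         possibilities = []
--         for option in F:
--             option = ord(option) - base
--             possibilities.append(abs(v - option))
--             possibilities.append(limit - abs(v - option))
--         sol += min(possibilities)
--     return sol
-- ===== SOURCE B (Python) =====
-- def solution(S: str, F: str) -> int:
--     # Different algorithm: sort F's values once; per character the answer is
--     # min(nearest |v-o|, 26 - farthest |v-o|), since min over o of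
--     # min(|v-o|, 26-|v-o|) = min(min_o |v-o|, 26 - max_o |v-o|).
--     # Nearest comes from a binary search (hand-written bisect_left, since no
--     # imports are allowed), farthest from the two endpoints of the sorted list.
--     if not S:
--         return 0
--     opts = sorted(ord(c) - 96 for c in F)
--     first, last = opts[0], opts[-1]
--     total = 0
--     for ch in S:
--         v = ord(ch) - 96
--         # bisect_left(opts, v)
--         lo, hi = 0, len(opts)
--         while lo < hi:
--             mid = (lo + hi) // 2
--             if opts[mid] < v:
--                 lo = mid + 1
--             else:
--                 hi = mid
--         if lo == len(opts):
--             near = v - last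
--         elif lo == 0:
--             near = first - v
--         else:
--             near = min(opts[lo] - v, v - opts[lo - 1])
--         far = max(v - first, last - v)
--         total += min(near, 26 - far)
--     return total
-- ===== Notes on version B (the rewrite author's own statement) =====
-- stated objective: faster
-- what changed: B sorts F's letter values once, rewrites the per-character minimum as min(nearest |v-o|, 26 - farthest |v-o|) (min distributes over the pair), and obtains the nearest option by binary search on the sorted list and the farthest from its two endpoints, instead of A's full scan of F building a 2|F|-element list per character of S.
import Mathlib
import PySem

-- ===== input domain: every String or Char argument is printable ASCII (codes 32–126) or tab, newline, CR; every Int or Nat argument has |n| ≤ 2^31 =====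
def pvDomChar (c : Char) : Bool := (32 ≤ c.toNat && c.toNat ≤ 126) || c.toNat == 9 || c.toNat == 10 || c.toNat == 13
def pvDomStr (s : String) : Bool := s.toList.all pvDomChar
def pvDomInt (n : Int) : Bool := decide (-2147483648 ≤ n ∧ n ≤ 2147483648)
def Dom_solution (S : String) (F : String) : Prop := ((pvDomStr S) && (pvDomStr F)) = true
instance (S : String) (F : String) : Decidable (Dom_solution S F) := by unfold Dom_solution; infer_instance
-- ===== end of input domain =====

-- B sorts F's values once and gets each character's answer as min(nearest |v-o| via binary
-- search, 26 - farthest |v-o| from the endpoints) instead of A's full scan of F per character.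
-- ===== PORT A =====
def solution (S : String) (F : String) : Int :=
  S.toList.foldl (fun sol char =>
    let v : Int := (char.toNat : Int) - 96
    let possibilities : List Int := F.toList.foldl (fun ps option =>
      let o : Int := (option.toNat : Int) - 96
      ps ++ [|v - o|, 26 - |v - o|]) []
    sol + (PySem.List.min? possibilities (fun x => x)).getD 0) 0

-- ===== PORT B =====
-- the hand-written binary-search loop in Source B is exactly CPython's bisect_left;
-- it is ported as the prelude's primitive PySem.List.bisectLeft (same loop).
def solution_alt (S : String) (F : String) : Int :=
  if S.toList = [] then 0
  else
    let opts : List Int := PySem.List.sorted (F.toList.map fun c => (c.toNat : Int) - 96) (fun x => x)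
    let first : Int := (PySem.List.pyGet? opts 0).getD 0
    let last : Int := (PySem.List.pyGet? opts (-1)).getD 0
    S.toList.foldl (fun total ch =>
      let v : Int := (ch.toNat : Int) - 96
      let lo : Nat := PySem.List.bisectLeft opts v
      let near : Int :=
        if lo = opts.length then v - last
        else if lo = 0 then first - v
        else min (opts.getD lo 0 - v) (v - opts.getD (lo - 1) 0)
      let far : Int := max (v - first) (last - v)
      total + min near (26 - far)) 0

-- ===== PRECONDITION & SPEC =====
-- Pre_ excludes exactly the inputs (S nonempty, F empty) on which Python A raises ValueError
-- (min of an empty list); B raises there too (IndexError on opts[0]).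
def Pre_solution (S : String) (F : String) : Prop := S = "" ∨ F ≠ ""
instance (S : String) (F : String) : Decidable (Pre_solution S F) := by unfold Pre_solution; infer_instance
def pvWitness_solution : String × String := ("abz", "kq")
def Spec_solution (S : String) (F : String) (out : Int) : Prop := out = solution_alt S F
instance (S : String) (F : String) (out : Int) : Decidable (Spec_solution S F out) := by unfold Spec_solution; infer_instance

-- ===== CLAIM =====
def Claim_equal_solution : Prop := ∀ (S : String) (F : String), Dom_solution S F → Pre_solution S F → Spec_solution S F (solution S F)

-- ===== LEMMAS AND PROOFS =====

-- A's per-character value (possibilities list, then min), let-free but definitionally A's body.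
def aInner (F : String) (c : Char) : Int :=
  (PySem.List.min? (F.toList.foldl (fun ps option =>
      ps ++ [|((c.toNat : Int) - 96) - ((option.toNat : Int) - 96)|,
             26 - |((c.toNat : Int) - 96) - ((option.toNat : Int) - 96)|]) []) (fun x => x)).getD 0

def optsOf (F : String) : List Int :=
  PySem.List.sorted (F.toList.map fun c => (c.toNat : Int) - 96) (fun x => x)

-- B's per-character value, matching the port's loop body definitionally.
def bInner (F : String) (c : Char) : Int :=
  min (if PySem.List.bisectLeft (optsOf F) ((c.toNat : Int) - 96) = (optsOf F).length then
        ((c.toNat : Int) - 96) - (PySem.List.pyGet? (optsOf F) (-1)).getD 0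
      else if PySem.List.bisectLeft (optsOf F) ((c.toNat : Int) - 96) = 0 then
        (PySem.List.pyGet? (optsOf F) 0).getD 0 - ((c.toNat : Int) - 96)
      else min ((optsOf F).getD (PySem.List.bisectLeft (optsOf F) ((c.toNat : Int) - 96)) 0 - ((c.toNat : Int) - 96))
               (((c.toNat : Int) - 96) - (optsOf F).getD (PySem.List.bisectLeft (optsOf F) ((c.toNat : Int) - 96) - 1) 0))
    (26 - max (((c.toNat : Int) - 96) - (PySem.List.pyGet? (optsOf F) 0).getD 0)
              ((PySem.List.pyGet? (optsOf F) (-1)).getD 0 - ((c.toNat : Int) - 96)))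

theorem pyGet_zero (l : List Int) (hlen : 0 < l.length) : (PySem.List.pyGet? l 0).getD 0 = l[0] := by
  simp only [PySem.List.pyGet?, PySem.List.pyIdx?]
  rw [if_pos le_rfl, if_pos (by omega)]
  simp [List.getElem?_eq_getElem hlen]

theorem pyGet_last (l : List Int) (hlen : 0 < l.length) :
    (PySem.List.pyGet? l (-1)).getD 0 = l[l.length - 1] := by
  simp only [PySem.List.pyGet?, PySem.List.pyIdx?]
  rw [if_neg (by norm_num), if_pos (by omega)]
  simp only [Option.bind_some]
  norm_num
  rw [List.getElem?_eq_getElem (by omega)]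
  rfl

-- near = nearest |v - o| over a sorted nonempty list: witness and lower bound
theorem near_spec (opts : List Int) (hne : opts ≠ []) (hp : opts.Pairwise (· ≤ ·)) (v : Int)
    (hsid : PySem.List.sorted opts (fun x => x) = opts) :
    (∃ k, ∃ hk : k < opts.length,
        (if PySem.List.bisectLeft opts v = opts.length then v - (PySem.List.pyGet? opts (-1)).getD 0
         else if PySem.List.bisectLeft opts v = 0 then (PySem.List.pyGet? opts 0).getD 0 - v
         else min (opts.getD (PySem.List.bisectLeft opts v) 0 - v)
                  (v - opts.getD (PySem.List.bisectLeft opts v - 1) 0)) = |v - opts[k]|) ∧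
    (∀ j, ∀ hj : j < opts.length,
        (if PySem.List.bisectLeft opts v = opts.length then v - (PySem.List.pyGet? opts (-1)).getD 0
         else if PySem.List.bisectLeft opts v = 0 then (PySem.List.pyGet? opts 0).getD 0 - v
         else min (opts.getD (PySem.List.bisectLeft opts v) 0 - v)
                  (v - opts.getD (PySem.List.bisectLeft opts v - 1) 0)) ≤ |v - opts[j]|) := by
  have hlen : 0 < opts.length := List.length_pos_iff.mpr hne
  obtain ⟨hle, hlt, hge⟩ := PySem.List.bisectLeft_spec opts v hp
  have hmono : ∀ p q : Nat, ∀ hpq : p ≤ q, ∀ hq : q < opts.length,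
      opts[p]'(Nat.lt_of_le_of_lt hpq hq) ≤ opts[q] := by
    intro p q hpq hq
    have := PySem.List.sorted_id_getElem_mono opts hpq (by rw [hsid]; exact hq)
    simpa [hsid] using this
  by_cases hN : PySem.List.bisectLeft opts v = opts.length
  · rw [if_pos hN, pyGet_last opts hlen]
    have hall : ∀ j, ∀ hj : j < opts.length, opts[j] < v := fun j hj => hlt j hj (by omega)
    have hlastlt := hall (opts.length - 1) (by omega)
    constructor
    · exact ⟨opts.length - 1, by omega, by rw [abs_of_pos (by omega)]⟩
    · intro j hj
      have h1 := hall j hj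
      have h2 := hmono j (opts.length - 1) (by omega) (by omega)
      rw [abs_of_pos (by omega)]; omega
  · by_cases h0 : PySem.List.bisectLeft opts v = 0
    · rw [if_neg hN, if_pos h0, pyGet_zero opts hlen]
      have hall : ∀ j, ∀ hj : j < opts.length, v ≤ opts[j] := fun j hj => hge j hj (by omega)
      have h00 := hall 0 hlen
      constructor
      · exact ⟨0, hlen, by rw [abs_of_nonpos (by omega)]; omega⟩
      · intro j hj
        have h1 := hall j hj
        have h2 := hmono 0 j (by omega) hj
        rw [abs_of_nonpos (by omega)]; omega
    · rw [if_neg hN, if_neg h0]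
      have hlo : PySem.List.bisectLeft opts v < opts.length := by omega
      have hlo0 : 0 < PySem.List.bisectLeft opts v := by omega
      rw [List.getD_eq_getElem opts 0 hlo, List.getD_eq_getElem opts 0 (by omega)]
      have hR := hge (PySem.List.bisectLeft opts v) hlo le_rfl
      have hL := hlt (PySem.List.bisectLeft opts v - 1) (by omega) (by omega)
      constructor
      · rcases min_cases (opts[PySem.List.bisectLeft opts v] - v)
          (v - opts[PySem.List.bisectLeft opts v - 1]'(by omega)) with ⟨heq, _⟩ | ⟨heq, _⟩
        · exact ⟨PySem.List.bisectLeft opts v, hlo, by rw [heq, abs_of_nonpos (by omega)]; omega⟩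
        · exact ⟨PySem.List.bisectLeft opts v - 1, by omega, by rw [heq, abs_of_pos (by omega)]⟩
      · intro j hj
        by_cases hjlo : j < PySem.List.bisectLeft opts v
        · have h1 := hlt j hj hjlo
          have h2 := hmono j (PySem.List.bisectLeft opts v - 1) (by omega) (by omega)
          have h3 := min_le_right (opts[PySem.List.bisectLeft opts v] - v)
            (v - opts[PySem.List.bisectLeft opts v - 1]'(by omega))
          rw [abs_of_pos (by omega)]; omega
        · have h1 := hge j hj (by omega)
          have h2 := hmono (PySem.List.bisectLeft opts v) j (by omega) hj
          have h3 := min_le_left (opts[PySem.List.bisectLeft opts v] - v)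
            (v - opts[PySem.List.bisectLeft opts v - 1]'(by omega))
          rw [abs_of_nonpos (by omega)]; omega

-- far = farthest |v - o| over a sorted nonempty list: witness and upper bound
theorem far_spec (opts : List Int) (hne : opts ≠ []) (v : Int)
    (hsid : PySem.List.sorted opts (fun x => x) = opts) :
    (∃ k, ∃ hk : k < opts.length,
        max (v - (PySem.List.pyGet? opts 0).getD 0) ((PySem.List.pyGet? opts (-1)).getD 0 - v)
          = |v - opts[k]|) ∧
    (∀ j, ∀ hj : j < opts.length,
        |v - opts[j]| ≤ max (v - (PySem.List.pyGet? opts 0).getD 0)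
                            ((PySem.List.pyGet? opts (-1)).getD 0 - v)) := by
  have hlen : 0 < opts.length := List.length_pos_iff.mpr hne
  have hmono : ∀ p q : Nat, ∀ hpq : p ≤ q, ∀ hq : q < opts.length,
      opts[p]'(Nat.lt_of_le_of_lt hpq hq) ≤ opts[q] := by
    intro p q hpq hq
    have := PySem.List.sorted_id_getElem_mono opts hpq (by rw [hsid]; exact hq)
    simpa [hsid] using this
  rw [pyGet_zero opts hlen, pyGet_last opts hlen]
  have h0l := hmono 0 (opts.length - 1) (by omega) (by omega)
  constructor
  · rcases max_cases (v - opts[0]) (opts[opts.length - 1] - v) with ⟨heq, hge⟩ | ⟨heq, hge⟩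
    · exact ⟨0, hlen, by rw [heq, abs_of_nonneg (by omega)]⟩
    · exact ⟨opts.length - 1, by omega, by rw [heq, abs_of_nonpos (by omega)]; omega⟩
  · intro j hj
    have h1 := hmono 0 j (by omega) hj
    have h2 := hmono j (opts.length - 1) (by omega) (by omega)
    have h3 := le_max_left (v - opts[0]) (opts[opts.length - 1] - v)
    have h4 := le_max_right (v - opts[0]) (opts[opts.length - 1] - v)
    rcases abs_cases (v - opts[j]) with ⟨heq, _⟩ | ⟨heq, _⟩ <;> omega

theorem inner_eq (F : String) (hF : F.toList ≠ []) (c : Char) : aInner F c = bInner F c := by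
  have hperm := PySem.List.sorted_perm (F.toList.map fun c => (c.toNat : Int) - 96) (fun x => x) false
  have hpair := PySem.List.sorted_pairwise (F.toList.map fun c => (c.toNat : Int) - 96) (fun x => x)
  have hsid : PySem.List.sorted (optsOf F) (fun x => x) = optsOf F :=
    PySem.List.sorted_eq_self_of_pairwise _ _ hpair
  have hne : optsOf F ≠ [] := by
    intro h
    have hl : (F.toList.map fun c => (c.toNat : Int) - 96) = [] :=
      (PySem.List.sorted_eq_nil_iff _ (fun x => x) false).mp h
    exact hF (List.map_eq_nil_iff.mp hl)
  have hmemopts : ∀ o, o ∈ optsOf F ↔ ∃ ch ∈ F.toList, (ch.toNat : Int) - 96 = o := by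
    intro o
    rw [show optsOf F = PySem.List.sorted (F.toList.map fun c => (c.toNat : Int) - 96) (fun x => x) from rfl,
      hperm.mem_iff, List.mem_map]
  -- set up the shared quantities
  set v : Int := (c.toNat : Int) - 96 with hv
  set opts := optsOf F with hopts
  obtain ⟨⟨kn, hkn, hnearw⟩, hnearlb⟩ := near_spec opts hne hpair v hsid
  obtain ⟨⟨kf, hkf, hfarw⟩, hfarub⟩ := far_spec opts hne v hsid
  -- A's possibilities list as a flatMap
  have hA : aInner F c
      = (PySem.List.min? (F.toList.flatMap fun o => [|v - ((o.toNat : Int) - 96)|,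
          26 - |v - ((o.toNat : Int) - 96)|]) (fun x => x)).getD 0 := by
    unfold aInner
    rw [PySem.List.foldl_append_eq_flatMap]
    simp only [List.nil_append]
    rw [hv]
  rw [hA]
  cases hL : (F.toList.flatMap fun o => [|v - ((o.toNat : Int) - 96)|,
      26 - |v - ((o.toNat : Int) - 96)|]) with
  | nil =>
      exfalso
      cases hFl : F.toList with
      | nil => exact hF hFl
      | cons x t => rw [hFl] at hL; simp at hL
  | cons x t =>
      rw [PySem.List.min?_id_cons, Option.getD_some]
      -- the B-side value
      have hBv : bInner F c
          = min (if PySem.List.bisectLeft opts v = opts.length then v - (PySem.List.pyGet? opts (-1)).getD 0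
              else if PySem.List.bisectLeft opts v = 0 then (PySem.List.pyGet? opts 0).getD 0 - v
              else min (opts.getD (PySem.List.bisectLeft opts v) 0 - v)
                       (v - opts.getD (PySem.List.bisectLeft opts v - 1) 0))
            (26 - max (v - (PySem.List.pyGet? opts 0).getD 0) ((PySem.List.pyGet? opts (-1)).getD 0 - v)) := rfl
      -- characterize A's min
      have hmem : t.foldl min x ∈ x :: t := List.min?_mem rfl
      have hlb : ∀ y ∈ x :: t, t.foldl min x ≤ y := fun y hy =>
        ((List.min?_eq_some_iff (xs := x :: t)).mp rfl).2 y hy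
      rw [← hL] at hmem hlb
      -- membership in the flatMap list, reduced to chars of F
      have hmemL : ∀ y, y ∈ (F.toList.flatMap fun o => [|v - ((o.toNat : Int) - 96)|,
          26 - |v - ((o.toNat : Int) - 96)|])
          ↔ ∃ ch ∈ F.toList, y = |v - ((ch.toNat : Int) - 96)| ∨
              y = 26 - |v - ((ch.toNat : Int) - 96)| := by
        intro y
        rw [List.mem_flatMap]
        constructor
        · rintro ⟨o, ho, hy⟩
          simp at hy
          exact ⟨o, ho, hy⟩
        · rintro ⟨o, ho, hy⟩
          exact ⟨o, ho, by simpa using hy⟩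
      -- B's value is a member
      have hBmem : bInner F c ∈ (F.toList.flatMap fun o => [|v - ((o.toNat : Int) - 96)|,
          26 - |v - ((o.toNat : Int) - 96)|]) := by
        rw [hBv]
        rcases min_cases (if PySem.List.bisectLeft opts v = opts.length then v - (PySem.List.pyGet? opts (-1)).getD 0
              else if PySem.List.bisectLeft opts v = 0 then (PySem.List.pyGet? opts 0).getD 0 - v
              else min (opts.getD (PySem.List.bisectLeft opts v) 0 - v)
                       (v - opts.getD (PySem.List.bisectLeft opts v - 1) 0))
            (26 - max (v - (PySem.List.pyGet? opts 0).getD 0) ((PySem.List.pyGet? opts (-1)).getD 0 - v))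
          with ⟨heq, _⟩ | ⟨heq, _⟩
        · rw [heq, hnearw]
          obtain ⟨ch, hch, hcho⟩ := (hmemopts _).mp (opts.getElem_mem hkn)
          rw [(hmemL _)]
          exact ⟨ch, hch, Or.inl (by rw [hcho])⟩
        · rw [heq]
          obtain ⟨ch, hch, hcho⟩ := (hmemopts _).mp (opts.getElem_mem hkf)
          rw [(hmemL _)]
          exact ⟨ch, hch, Or.inr (by rw [hcho, ← hfarw])⟩
      -- B's value is a lower bound
      have hBlb : ∀ y ∈ (F.toList.flatMap fun o => [|v - ((o.toNat : Int) - 96)|,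
          26 - |v - ((o.toNat : Int) - 96)|]), bInner F c ≤ y := by
        intro y hy
        obtain ⟨ch, hch, hcase⟩ := (hmemL y).mp hy
        have hoin : ((ch.toNat : Int) - 96) ∈ opts := (hmemopts _).mpr ⟨ch, hch, rfl⟩
        obtain ⟨j, hj, hje⟩ := List.mem_iff_getElem.mp hoin
        rcases hcase with h | h
        · calc bInner F c ≤ _ := by rw [hBv]; exact min_le_left _ _
            _ ≤ |v - opts[j]| := hnearlb j hj
            _ = y := by rw [hje]; exact h.symm
        · calc bInner F c ≤ _ := by rw [hBv]; exact min_le_right _ _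
            _ ≤ 26 - |v - opts[j]| := sub_le_sub_left (hfarub j hj) 26
            _ = y := by rw [hje]; exact h.symm
      exact le_antisymm (hlb _ hBmem) (hBlb _ hmem)

theorem toList_ne_nil_of_ne_empty (F : String) (h : F ≠ "") : F.toList ≠ [] := by
  intro hn; apply h; exact String.toList_inj.mp (by simpa using hn)

-- ===== VERDICT =====
theorem solution_spec : Claim_equal_solution := by
  intro S F _ hpre
  unfold Spec_solution
  by_cases hS : S.toList = []
  · unfold solution solution_alt
    rw [hS, if_pos rfl]
    rfl
  · have hF : F.toList ≠ [] := by
      rcases hpre with h | h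
      · exact absurd (by rw [h]; rfl) hS
      · exact toList_ne_nil_of_ne_empty F h
    unfold solution solution_alt
    rw [if_neg hS]
    show S.toList.foldl (fun sol char => sol + aInner F char) 0
      = S.toList.foldl (fun total ch => total + bInner F ch) 0
    have hstep : (fun (sol : Int) (char : Char) => sol + aInner F char)
        = (fun (total : Int) (ch : Char) => total + bInner F ch) :=
      funext fun s => funext fun ch => by rw [inner_eq F hF ch]
    rw [hstep]
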